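-- pv_equiv track=rewrite | github.com/thetech-ari/Rule_Based_Dorm_Meal_AI | dorm_meal_recommender.py | recommend_meal
-- ===== SOURCE A (Python) =====
-- def recommend_meal(ingredients):
--     ingredients = [item.strip().lower() for item in ingredients.split(",")]
--
--     if "eggs" in ingredients and "bread" in ingredients:
--         return "You can make French Toast!"
--     elif "rice" in ingredients and "beans" in ingredients:
--         return "How about a Rice and Beans Bowl?"
--     elif "ramen" in ingredients and "cheese" in ingredients:
--         return "Try making some Cheesy Ramen!"
--     elif "tortilla" in ingredients and "cheese" in ingredients:
--         return "Sounds like a Quesadilla kind of day!"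
--     else:
--         return "Sorry, I don't have a recipe for those ingredients. Try a snack or get takeout."
-- ===== SOURCE B (Python) =====
-- # B: single-pass bitmask accumulation (ingredient -> bit via dict, one fold over the items),
-- # then pattern match on the mask; replaces A's repeated membership scans of the item list.
-- BITS = {"eggs": 1, "bread": 2, "rice": 4, "beans": 8, "ramen": 16, "cheese": 32, "tortilla": 64}
-- PATTERNS = [
--     (1 | 2, "You can make French Toast!"),
--     (4 | 8, "How about a Rice and Beans Bowl?"),
--     (16 | 32, "Try making some Cheesy Ramen!"),
--     (64 | 32, "Sounds like a Quesadilla kind of day!"),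
-- ]
--
-- def recommend_meal(ingredients):
--     mask = 0
--     for item in ingredients.split(","):
--         mask |= BITS.get(item.strip().lower(), 0)
--     for pattern, meal in PATTERNS:
--         if mask & pattern == pattern:
--             return meal
--     return "Sorry, I don't have a recipe for those ingredients. Try a snack or get takeout."
-- ===== Notes on version B (the rewrite author's own statement) =====
-- stated objective: alternative
-- what changed: B accumulates a bitmask of key ingredients in a single fold over the parsed items (dict lookup per item) and matches the mask against bit patterns, instead of A's if/elif chain of repeated membership scans of the item list.
import Mathlib
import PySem

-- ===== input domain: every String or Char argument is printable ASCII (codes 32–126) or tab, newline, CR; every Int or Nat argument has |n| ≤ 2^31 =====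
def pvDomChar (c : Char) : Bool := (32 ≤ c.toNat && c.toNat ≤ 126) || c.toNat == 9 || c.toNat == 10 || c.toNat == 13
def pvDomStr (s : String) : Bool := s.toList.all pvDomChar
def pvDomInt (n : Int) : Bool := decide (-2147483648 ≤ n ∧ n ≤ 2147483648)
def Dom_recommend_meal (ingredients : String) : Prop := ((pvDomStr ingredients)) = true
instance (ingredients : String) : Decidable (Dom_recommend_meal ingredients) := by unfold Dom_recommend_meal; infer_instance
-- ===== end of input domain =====

-- B accumulates a bitmask of key ingredients in one fold over the parsed items and matches it
-- against bit patterns, replacing A's if/elif chain of membership scans (objective: alternative).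

-- ===== PORT A =====
-- split? with the nonempty literal sep "," is always `some`, so .getD [] is exact.
def recommend_meal (ingredients : String) : String :=
  let items := ((PySem.Str.split? ingredients ",").getD []).map (fun it => PySem.Str.lower (PySem.Str.strip it))
  if items.contains "eggs" && items.contains "bread" then
    "You can make French Toast!"
  else if items.contains "rice" && items.contains "beans" then
    "How about a Rice and Beans Bowl?"
  else if items.contains "ramen" && items.contains "cheese" then
    "Try making some Cheesy Ramen!"
  else if items.contains "tortilla" && items.contains "cheese" then
    "Sounds like a Quesadilla kind of day!"
  else
    "Sorry, I don't have a recipe for those ingredients. Try a snack or get takeout."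

-- ===== PORT B =====
def pvBITS : PySem.Dict String Nat :=
  PySem.Dict.ofList [("eggs", 1), ("bread", 2), ("rice", 4), ("beans", 8),
                     ("ramen", 16), ("cheese", 32), ("tortilla", 64)]

def pvPATTERNS : List (Nat × String) :=
  [ (1 ||| 2, "You can make French Toast!"),
    (4 ||| 8, "How about a Rice and Beans Bowl?"),
    (16 ||| 32, "Try making some Cheesy Ramen!"),
    (64 ||| 32, "Sounds like a Quesadilla kind of day!") ]

def recommend_meal_alt (ingredients : String) : String :=
  let mask := ((PySem.Str.split? ingredients ",").getD []).foldl
    (fun m item => m ||| PySem.Dict.getD pvBITS (PySem.Str.lower (PySem.Str.strip item)) 0) 0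
  match pvPATTERNS.find? (fun p => mask &&& p.1 == p.1) with
  | some p => p.2
  | none => "Sorry, I don't have a recipe for those ingredients. Try a snack or get takeout."

-- ===== PRECONDITION & SPEC =====
def Spec_recommend_meal (ingredients : String) (out : String) : Prop := out = recommend_meal_alt ingredients
instance (ingredients : String) (out : String) : Decidable (Spec_recommend_meal ingredients out) := by unfold Spec_recommend_meal; infer_instance

-- ===== CLAIM (what is proved, stated in full; the proofs are below) =====
def Claim_equal_recommend_meal : Prop := ∀ (ingredients : String), Dom_recommend_meal ingredients → Spec_recommend_meal ingredients (recommend_meal ingredients)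

-- ===== LEMMAS AND PROOFS =====

-- the dict literal, in `mk` form so the get?_mk_cons lemma applies
theorem pvBITS_mk : pvBITS = PySem.Dict.mk
    [("eggs",(1:Nat)),("bread",2),("rice",4),("beans",8),("ramen",16),("cheese",32),("tortilla",64)] := by
  decide

-- each tested bit of the dict lookup identifies exactly one key string
theorem pvBITS_testBit (s : String) (k : String) (i : Nat)
    (h : (k, i) ∈ [("eggs",0),("bread",1),("rice",2),("beans",3),("ramen",4),("cheese",5),("tortilla",6)]) :
    (PySem.Dict.getD pvBITS s 0).testBit i = (s == k) := by
  rw [pvBITS_mk]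
  simp only [List.mem_cons, List.not_mem_nil, or_false, Prod.mk.injEq] at h
  simp only [PySem.Dict.getD_eq_get?_getD, PySem.Dict.get?_mk_cons, beq_iff_eq]
  rcases h with ⟨rfl,rfl⟩|⟨rfl,rfl⟩|⟨rfl,rfl⟩|⟨rfl,rfl⟩|⟨rfl,rfl⟩|⟨rfl,rfl⟩|⟨rfl,rfl⟩ <;>
    split_ifs <;> (try simp_all [PySem.Dict.get?]) <;> (try (subst_vars; decide)) <;>
      (intro hh; subst hh; simp_all)

-- every value the dict lookup can produce is < 128
theorem pvBITS_lt (s : String) : PySem.Dict.getD pvBITS s 0 < 128 := by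
  rw [pvBITS_mk]
  simp only [PySem.Dict.getD_eq_get?_getD, PySem.Dict.get?_mk_cons]
  split_ifs <;> simp [PySem.Dict.get?]

-- the accumulated mask stays < 128
theorem pvMask_lt (l : List String) (a : Nat) (ha : a < 128) :
    l.foldl (fun m it => m ||| PySem.Dict.getD pvBITS (PySem.Str.lower (PySem.Str.strip it)) 0) a < 128 := by
  induction l generalizing a with
  | nil => exact ha
  | cons x xs ih => exact ih _ (Nat.or_lt_two_pow (n := 7) ha (pvBITS_lt _))

-- testBit distributes over the or-fold
theorem pvMask_testBit (l : List String) (a : Nat) (i : Nat) :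
    (l.foldl (fun m it => m ||| PySem.Dict.getD pvBITS (PySem.Str.lower (PySem.Str.strip it)) 0) a).testBit i
      = (a.testBit i || l.any (fun it => (PySem.Dict.getD pvBITS (PySem.Str.lower (PySem.Str.strip it)) 0).testBit i)) := by
  induction l generalizing a with
  | nil => simp
  | cons x xs ih => simp [ih, Nat.testBit_or, Bool.or_assoc]

-- membership of a key in the normalized item list = the corresponding mask bit
theorem pvContains_eq_testBit (l : List String) (i : Nat) (k : String)
    (h : (k, i) ∈ [("eggs",0),("bread",1),("rice",2),("beans",3),("ramen",4),("cheese",5),("tortilla",6)]) :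
    (l.map (fun it => PySem.Str.lower (PySem.Str.strip it))).contains k
      = (l.foldl (fun m it => m ||| PySem.Dict.getD pvBITS (PySem.Str.lower (PySem.Str.strip it)) 0) 0).testBit i := by
  rw [pvMask_testBit]
  simp only [Nat.zero_testBit, Bool.false_or, List.any_map, List.contains_eq_any_beq, Function.comp_def]
  refine List.any_congr rfl (fun it => ?_)
  rw [pvBITS_testBit (PySem.Str.lower (PySem.Str.strip it)) k i h]
  simp [BEq.comm]

-- ===== VERDICT (by name: the statement is the Claim_ definition above) =====
theorem recommend_meal_spec : Claim_equal_recommend_meal := by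
  intro ing _
  unfold Spec_recommend_meal recommend_meal recommend_meal_alt
  simp only [pvPATTERNS, List.find?]
  rw [pvContains_eq_testBit _ 0 "eggs" (by decide), pvContains_eq_testBit _ 1 "bread" (by decide),
      pvContains_eq_testBit _ 2 "rice" (by decide), pvContains_eq_testBit _ 3 "beans" (by decide),
      pvContains_eq_testBit _ 4 "ramen" (by decide), pvContains_eq_testBit _ 5 "cheese" (by decide),
      pvContains_eq_testBit _ 6 "tortilla" (by decide)]
  have hlt := pvMask_lt ((PySem.Str.split? ing ",").getD []) 0 (by decide)
  generalize ((PySem.Str.split? ing ",").getD []).foldl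
      (fun m it => m ||| PySem.Dict.getD pvBITS (PySem.Str.lower (PySem.Str.strip it)) 0) 0 = mask at hlt ⊢
  interval_cases mask <;> rfl
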